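-- pv_equiv track=rewrite | github.com/Leonard-Albuquerque/API-TrataListas-BOT | index.py | distribuir_aquecimento
-- ===== SOURCE A (Python) =====
-- def distribuir_aquecimento(total_pessoas, etiqueta_nome):
--     # Definir o limite para cada grupo de aquecimento
--     limites = [30, 30, 60, 60, 90, 90, 180]
--     etiquetas = []
--     grupo_index = 1
--     pessoas_contadas = 0
--
--     for i in range(total_pessoas):
--         # Se o limite do grupo atual for atingido, passa para o próximo
--         if pessoas_contadas >= limites[min(grupo_index - 1, len(limites) - 1)]:
--             grupo_index += 1
--             pessoas_contadas = 0
--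
--         etiquetas.append(f"{etiqueta_nome}_G{grupo_index}")
--         pessoas_contadas += 1
--
--     return etiquetas
-- ===== SOURCE B (Python) =====
-- def distribuir_aquecimento(total_pessoas, etiqueta_nome):
--     # Per-group batched emission: compute each group's capacity and append
--     # that many labels at once, instead of counting person by person.
--     limites = [30, 30, 60, 60, 90, 90, 180]
--     etiquetas = []
--     restantes = total_pessoas
--     k = 1
--     while restantes > 0:
--         capacidade = limites[min(k - 1, len(limites) - 1)]
--         take = min(restantes, capacidade)
--         etiquetas.extend([f"{etiqueta_nome}_G{k}"] * take)
--         restantes -= take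
--         k += 1
--     return etiquetas
-- ===== Notes on version B (the rewrite author's own statement) =====
-- stated objective: alternative
-- what changed: Replaces the per-person loop with its group counter and reset logic by a per-group loop that computes each group's capacity once and emits min(remaining, capacity) labels in one batch.
import Mathlib
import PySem

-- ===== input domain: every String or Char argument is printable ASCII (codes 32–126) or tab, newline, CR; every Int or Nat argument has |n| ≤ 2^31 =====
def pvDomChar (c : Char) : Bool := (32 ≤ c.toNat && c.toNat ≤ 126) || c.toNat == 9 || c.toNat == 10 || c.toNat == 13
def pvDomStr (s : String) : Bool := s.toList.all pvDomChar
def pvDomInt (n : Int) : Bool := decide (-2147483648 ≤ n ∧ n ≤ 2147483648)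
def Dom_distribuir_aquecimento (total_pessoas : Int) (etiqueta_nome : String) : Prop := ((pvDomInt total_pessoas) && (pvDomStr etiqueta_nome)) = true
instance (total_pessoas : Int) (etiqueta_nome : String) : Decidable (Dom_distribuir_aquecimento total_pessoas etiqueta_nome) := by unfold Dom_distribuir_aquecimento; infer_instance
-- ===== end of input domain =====

-- B replaces A's per-person counter loop by a per-group batched emission; objective: alternative decomposition (same O(n) cost).

-- ===== PORT A =====
-- limites[min(grupo_index-1, 6)]; the index is always in range, so getD is exact
def pvCapA (g : Nat) : Nat := List.getD [30, 30, 60, 60, 90, 90, 180] (min (g - 1) 6) 0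

-- the body of A's for-loop over range(total_pessoas), state = (grupo_index, pessoas_contadas);
-- the appended labels are returned front-to-back
def pvLoopA (s : String) : Nat → Nat → Nat → List String
  | 0, _, _ => []
  | m + 1, g, cnt =>
    if pvCapA g ≤ cnt then
      (s ++ "_G" ++ PySem.Int.toStr ((g + 1 : Nat) : Int)) :: pvLoopA s m (g + 1) 1
    else
      (s ++ "_G" ++ PySem.Int.toStr ((g : Nat) : Int)) :: pvLoopA s m g (cnt + 1)

def distribuir_aquecimento (total_pessoas : Int) (etiqueta_nome : String) : List String :=
  pvLoopA etiqueta_nome total_pessoas.toNat 1 0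

-- ===== PORT B =====
def pvCapB (k : Nat) : Nat := List.getD [30, 30, 60, 60, 90, 90, 180] (min (k - 1) 6) 0

theorem pvCapB_pos (k : Nat) : 1 ≤ pvCapB k := by
  unfold pvCapB
  have h : min (k - 1) 6 ≤ 6 := Nat.min_le_right _ _
  interval_cases h : min (k - 1) 6 <;> decide

-- B's while-loop: remaining > 0 ↔ the Nat remaining is a successor
def pvLoopB (s : String) : Nat → Nat → List String
  | 0, _ => []
  | m + 1, k =>
    let take := min (m + 1) (pvCapB k)
    List.replicate take (s ++ "_G" ++ PySem.Int.toStr ((k : Nat) : Int)) ++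
      pvLoopB s (m + 1 - take) (k + 1)
  decreasing_by
    have := pvCapB_pos k
    omega

def distribuir_aquecimento_alt (total_pessoas : Int) (etiqueta_nome : String) : List String :=
  pvLoopB etiqueta_nome total_pessoas.toNat 1

-- ===== PRECONDITION & SPEC =====
def Spec_distribuir_aquecimento (total_pessoas : Int) (etiqueta_nome : String) (out : List String) : Prop := out = distribuir_aquecimento_alt total_pessoas etiqueta_nome
instance (total_pessoas : Int) (etiqueta_nome : String) (out : List String) : Decidable (Spec_distribuir_aquecimento total_pessoas etiqueta_nome out) := by unfold Spec_distribuir_aquecimento; infer_instance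

-- ===== CLAIM (what is proved, stated in full; the proofs are below) =====
def Claim_equal_distribuir_aquecimento : Prop := ∀ (total_pessoas : Int) (etiqueta_nome : String), Dom_distribuir_aquecimento total_pessoas etiqueta_nome → Spec_distribuir_aquecimento total_pessoas etiqueta_nome (distribuir_aquecimento total_pessoas etiqueta_nome)

-- ===== LEMMAS AND PROOFS =====

theorem pvCapA_pos (g : Nat) : 1 ≤ pvCapA g := pvCapB_pos g

theorem pvCapA_eq_pvCapB (g : Nat) : pvCapA g = pvCapB g := rfl

-- once the counter has reached the current group's capacity, A behaves as if it
-- had already moved to group g+1 with counter 0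
theorem pvLoopA_bump (s : String) (m g cnt : Nat) (h : pvCapA g ≤ cnt) :
    pvLoopA s m g cnt = pvLoopA s m (g + 1) 0 := by
  cases m with
  | zero => rfl
  | succ m' =>
    have h1 : ¬ pvCapA (g + 1) ≤ 0 := by have := pvCapA_pos (g + 1); omega
    simp [pvLoopA, h, h1]

-- filling the current group: A emits (cap g - cnt) labels of group g (capped by the
-- remaining count m) and then continues from group g+1 with counter 0
theorem pvLoopA_fill (s : String) (m : Nat) :
    ∀ cnt g : Nat, cnt < pvCapA g →
      pvLoopA s m g cnt =
        List.replicate (min m (pvCapA g - cnt)) (s ++ "_G" ++ PySem.Int.toStr ((g : Nat) : Int)) ++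
          pvLoopA s (m - (pvCapA g - cnt)) (g + 1) 0 := by
  induction m with
  | zero => intro cnt g _; simp [pvLoopA]
  | succ m' ih =>
    intro cnt g hlt
    have hnb : ¬ pvCapA g ≤ cnt := by omega
    by_cases hc : cnt + 1 < pvCapA g
    · have hmin : min (m' + 1) (pvCapA g - cnt) = min m' (pvCapA g - (cnt + 1)) + 1 := by omega
      have hsub : m' + 1 - (pvCapA g - cnt) = m' - (pvCapA g - (cnt + 1)) := by omega
      simp only [pvLoopA, if_neg hnb, ih (cnt + 1) g hc, hmin, hsub, List.replicate_succ,
        List.cons_append]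
    · -- cnt + 1 = cap g : this label finishes the group
      have hcap : pvCapA g ≤ cnt + 1 := by omega
      have h1 : pvCapA g - cnt = 1 := by omega
      simp only [pvLoopA, if_neg hnb, pvLoopA_bump s m' g (cnt + 1) hcap, h1]
      rw [show min (m' + 1) 1 = 1 from by omega]
      simp

-- main correspondence: A from a fresh group equals B's batched loop
theorem pvLoopA_eq_pvLoopB (s : String) (m : Nat) : ∀ g : Nat, pvLoopA s m g 0 = pvLoopB s m g := by
  induction m using Nat.strong_induction_on with
  | _ m ih =>
    intro g
    cases m with
    | zero => rw [pvLoopB]; rfl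
    | succ m' =>
      have hcap := pvCapA_pos g
      have h0 : (0 : Nat) < pvCapA g := hcap
      rw [pvLoopA_fill s (m' + 1) 0 g h0]
      rw [pvLoopB]
      have htake : min (m' + 1) (pvCapB g) ≥ 1 := by
        have := pvCapB_pos g; omega
      have hsub : m' + 1 - (pvCapA g - 0) = m' + 1 - min (m' + 1) (pvCapB g) := by
        rw [pvCapA_eq_pvCapB]; omega
      rw [Nat.sub_zero, pvCapA_eq_pvCapB]
      have hlt : m' + 1 - min (m' + 1) (pvCapB g) < m' + 1 := by omega
      rw [show m' + 1 - pvCapB g = m' + 1 - min (m' + 1) (pvCapB g) by omega]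
      rw [ih _ hlt (g + 1)]

-- ===== VERDICT (by name: the statement is the Claim_ definition above) =====
theorem distribuir_aquecimento_spec : Claim_equal_distribuir_aquecimento := by
  intro n s _
  unfold Spec_distribuir_aquecimento distribuir_aquecimento distribuir_aquecimento_alt
  exact pvLoopA_eq_pvLoopB s n.toNat 1
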